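-- pv_equiv track=rewrite | github.com/JoaoDeluchi/Python-Flask | eecommerce-nestle/app/domains/excel/import_excel/excel_column_converter.py | convert_column
-- ===== SOURCE A (Python) =====
-- from string import ascii_uppercase
--
-- characters = ascii_uppercase
--
-- def convert_column(arg:int) -> str:
--     count_times = 0
--     position = ''
--     while(arg>0):
--         if(is_bigger_than_26(arg)):
--             position = characters[count_times]
--             count_times += 1
--             arg = arg-26
--         else:
--             position += characters[arg-1]
--             arg = 0
--     return position
--
-- def is_bigger_than_26(value:int) -> bool:
--     if value > 26:
--         return True
--     return False
-- ===== SOURCE B (Python) =====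
-- from string import ascii_uppercase
--
-- characters = ascii_uppercase
--
-- def convert_column(arg: int) -> str:
--     if arg <= 0:
--         return ''
--     k, r = divmod(arg - 1, 26)
--     prefix = characters[k - 1] if k > 0 else ''
--     return prefix + characters[r]
-- ===== Notes on version B (the rewrite author's own statement) =====
-- stated objective: simpler
-- what changed: Replaced the subtraction while-loop (which repeatedly overwrites the prefix character) with a closed-form divmod computation of the same two-character-max string, keeping the unguarded characters[k-1] indexing so it raises IndexError on exactly the same large args as A.
import Mathlib
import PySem

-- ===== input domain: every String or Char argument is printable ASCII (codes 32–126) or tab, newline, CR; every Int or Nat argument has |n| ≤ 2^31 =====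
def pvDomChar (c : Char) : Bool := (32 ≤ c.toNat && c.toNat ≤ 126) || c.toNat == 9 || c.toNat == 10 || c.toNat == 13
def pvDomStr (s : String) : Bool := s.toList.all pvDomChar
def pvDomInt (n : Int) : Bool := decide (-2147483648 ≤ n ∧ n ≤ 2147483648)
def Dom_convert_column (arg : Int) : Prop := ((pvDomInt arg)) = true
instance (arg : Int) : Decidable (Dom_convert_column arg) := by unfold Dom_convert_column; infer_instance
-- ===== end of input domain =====

-- B replaces A's subtraction loop by closed-form arithmetic (divmod) while keeping
-- A's quirky two-character-max output; Pre_ keeps exactly the args where both Pythons return.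

-- ===== PORT A =====
def pvChars : String := "ABCDEFGHIJKLMNOPQRSTUVWXYZ"

def is_bigger_than_26 (value : Int) : Bool :=
  if value > 26 then true else false

-- the while loop of A; `none` = IndexError from characters[count_times].
-- `fuel` only makes the recursion structural; fuel = arg.toNat + 1 always suffices
-- (arg drops by 26 per iteration), so the 0-fuel case is unreachable while arg > 0.
def convertLoopA (fuel : Nat) (arg count_times : Int) (position : String) : Option String :=
  match fuel with
  | 0 => some position
  | fuel + 1 =>
    if arg > 0 then
      if is_bigger_than_26 arg then
        match PySem.Str.pyGet? pvChars count_times with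
        | none => none
        | some c => convertLoopA fuel (arg - 26) (count_times + 1) (String.ofList [c])
      else
        match PySem.Str.pyGet? pvChars (arg - 1) with
        | none => none
        | some c => some (position ++ String.ofList [c])
    else some position

def convert_column (arg : Int) : String := (convertLoopA (arg.toNat + 1) arg 0 "").getD ""

-- ===== PORT B =====
def convert_column_alt (arg : Int) : String :=
  if arg ≤ 0 then "" else
    let k := PySem.Int.floordiv (arg - 1) 26
    let r := PySem.Int.mod (arg - 1) 26
    let pre := if k > 0 then
        (match PySem.Str.pyGet? pvChars (k - 1) with
         | some c => String.ofList [c]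
         | none => "")   -- IndexError in Python; outside Pre_
      else ""
    pre ++ (match PySem.Str.pyGet? pvChars r with
            | some c => String.ofList [c]
            | none => "")

-- ===== PRECONDITION & SPEC =====
-- Pre_ excludes exactly the large args on which both Pythons raise IndexError
-- (the prefix index runs past the 26-letter alphabet).
def Pre_convert_column (arg : Int) : Prop := arg ≤ 702
instance (arg : Int) : Decidable (Pre_convert_column arg) := by unfold Pre_convert_column; infer_instance
def pvWitness_convert_column : Int := (30)

def Spec_convert_column (arg : Int) (out : String) : Prop := out = convert_column_alt arg
instance (arg : Int) (out : String) : Decidable (Spec_convert_column arg out) := by unfold Spec_convert_column; infer_instance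

-- ===== CLAIM (what is proved, stated in full; the proofs are below) =====
def Claim_equal_convert_column : Prop := ∀ (arg : Int), Dom_convert_column arg → Pre_convert_column arg → Spec_convert_column arg (convert_column arg)

-- ===== LEMMAS AND PROOFS =====
-- the finite positive range is checked by kernel evaluation
set_option maxRecDepth 4000 in
set_option maxHeartbeats 1000000 in
theorem pv_finite_check : ∀ n : Fin 703, convert_column (n : Int) = convert_column_alt (n : Int) := by decide

theorem pv_nonpos (arg : Int) (h : arg ≤ 0) :
    convert_column arg = convert_column_alt arg := by
  unfold convert_column convert_column_alt
  simp [convertLoopA, show ¬ arg > 0 by omega, h]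

-- ===== VERDICT (by name: the statement is the Claim_ definition above) =====
theorem convert_column_spec : Claim_equal_convert_column := by
  intro arg _ hpre
  unfold Spec_convert_column
  by_cases h : arg ≤ 0
  · exact pv_nonpos arg h
  · have h0 : 0 ≤ arg := by omega
    have hlt : arg.toNat < 703 := by unfold Pre_convert_column at hpre; omega
    have := pv_finite_check ⟨arg.toNat, hlt⟩
    simpa [Int.toNat_of_nonneg h0] using this
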